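-- pv_equiv track=rewrite | github.com/gvnberaldi/HousePricePrediction | test_max_clique.py | decide_maximal_clique
-- ===== SOURCE A (Python) =====
-- def decide_clique(graph: list[list[int]] , set_nodes : list[int] ):
--
--     for i in set_nodes:
--         for j in set_nodes:
--             if i != j and graph[i][j] == 0:
--                 return False
--
--     return True
--
-- def decide_maximal_clique(graph: list[list] , set_nodes : list[int]):
--
--     if not decide_clique(graph=graph, set_nodes=set_nodes):
--         return False
--
--     for i in range(len(graph)):
--         if i not in set_nodes:
--             b = True
--             for j in set_nodes:
--                 if graph[i][j] == 0:
--                     b = False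
--             if b :
--                 return False
--
--     return True
-- ===== SOURCE B (Python) =====
-- def decide_maximal_clique(graph: list[list], set_nodes: list[int]):
--     # clique test: any non-adjacent pair inside set_nodes kills it
--     if any(graph[i][j] == 0 for i in set_nodes for j in set_nodes if i != j):
--         return False
--     # maximality: running intersection of neighbour sets of the clique members
--     cand = set(range(len(graph)))
--     for j in set_nodes:
--         cand &= {i for i in range(len(graph)) if graph[i][j] != 0}
--     cand -= set(set_nodes)
--     return not cand
-- ===== Notes on version B (the rewrite author's own statement) =====
-- stated objective: idiomatic
-- what changed: The maximality test's per-candidate boolean flag with nested loops is replaced by a running set intersection of the clique members' in-neighbour sets (seeded with all nodes, minus set_nodes), and the clique check becomes a single any() over pairs; Pre_ requires every node of set_nodes to be a valid Python index into graph and into every row, so it also excludes some inputs where A returns only because an early return fires before the first invalid access (on those B either raises or, short-circuiting the same way, agrees with A).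
-- outside the precondition, e.g. on decide_maximal_clique([[]], [0]): A returns True, B raises IndexError; on decide_maximal_clique([[0, 0], [0, 0]], [0, 1, 5]): A returns False, B returns False
import Mathlib
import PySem

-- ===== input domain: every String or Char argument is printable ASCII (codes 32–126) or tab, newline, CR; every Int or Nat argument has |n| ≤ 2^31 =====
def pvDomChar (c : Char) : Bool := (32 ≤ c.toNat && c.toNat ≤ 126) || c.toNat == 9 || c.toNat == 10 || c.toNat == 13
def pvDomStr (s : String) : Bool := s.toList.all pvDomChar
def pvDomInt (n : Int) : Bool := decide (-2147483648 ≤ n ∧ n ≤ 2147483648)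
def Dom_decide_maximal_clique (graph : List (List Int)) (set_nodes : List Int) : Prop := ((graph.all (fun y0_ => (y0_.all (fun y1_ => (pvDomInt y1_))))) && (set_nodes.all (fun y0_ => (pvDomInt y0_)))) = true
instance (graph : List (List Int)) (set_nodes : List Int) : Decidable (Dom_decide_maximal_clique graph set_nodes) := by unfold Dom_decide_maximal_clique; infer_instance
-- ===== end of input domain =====

-- B replaces A's per-candidate boolean flag by a running intersection of the clique
-- members' in-neighbour sets (idiomatic set formulation); return values are identical.

-- graph[i][j]; total via defaults, exact under Pre_ (indices in Python range)
def pvAt (graph : List (List Int)) (i j : Int) : Int :=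
  PySem.List.pyGetD (PySem.List.pyGetD graph i []) j 0

-- ===== PORT A =====
def cliqueInner (graph : List (List Int)) (i : Int) : List Int → Bool
  | [] => true
  | j :: js => if i ≠ j ∧ pvAt graph i j = 0 then false else cliqueInner graph i js

def cliqueOuter (graph : List (List Int)) (set_nodes : List Int) : List Int → Bool
  | [] => true
  | i :: is => if cliqueInner graph i set_nodes = false then false
               else cliqueOuter graph set_nodes is

def decide_clique (graph : List (List Int)) (set_nodes : List Int) : Bool :=
  cliqueOuter graph set_nodes set_nodes

def maxInner (graph : List (List Int)) (i : Int) (set_nodes : List Int) : Bool :=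
  set_nodes.foldl (fun b j => if pvAt graph i j = 0 then false else b) true

def maxOuter (graph : List (List Int)) (set_nodes : List Int) : List Int → Bool
  | [] => true
  | i :: is =>
      if i ∉ set_nodes then
        (if maxInner graph i set_nodes then false else maxOuter graph set_nodes is)
      else maxOuter graph set_nodes is

def decide_maximal_clique (graph : List (List Int)) (set_nodes : List Int) : Bool :=
  if decide_clique graph set_nodes = false then false
  else maxOuter graph set_nodes (PySem.List.pyRange 0 graph.length 1)

-- ===== PORT B =====
def decide_maximal_clique_alt (graph : List (List Int)) (set_nodes : List Int) : Bool :=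
  if set_nodes.any (fun i => set_nodes.any (fun j =>
        decide (i ≠ j) && decide (pvAt graph i j = 0))) then false
  else
    let cand0 := PySem.List.pyRange 0 graph.length 1
    let cand := set_nodes.foldl
        (fun c j => c.filter (fun i => !decide (pvAt graph i j = 0))) cand0
    ((cand.filter (fun i => !decide (i ∈ set_nodes))).isEmpty)

-- ===== PRECONDITION & SPEC =====
-- Pre_ excludes the inputs on which Python A raises IndexError: some node of
-- set_nodes is not a valid (possibly negative) Python index into graph or into
-- some row.  It is slightly narrower than "A returns": it requires all such
-- accesses valid even where A would return False before reaching a bad access.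
def Pre_decide_maximal_clique (graph : List (List Int)) (set_nodes : List Int) : Prop :=
  ∀ a ∈ set_nodes, PySem.Raise.InRange graph.length a ∧
    ∀ row ∈ graph, PySem.Raise.InRange row.length a
instance (graph : List (List Int)) (set_nodes : List Int) : Decidable (Pre_decide_maximal_clique graph set_nodes) := by unfold Pre_decide_maximal_clique; infer_instance

def pvWitness_decide_maximal_clique : List (List Int) × List Int :=
  ([[1, 1], [1, 1]], [0, 1])

def Spec_decide_maximal_clique (graph : List (List Int)) (set_nodes : List Int) (out : Bool) : Prop := out = decide_maximal_clique_alt graph set_nodes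
instance (graph : List (List Int)) (set_nodes : List Int) (out : Bool) : Decidable (Spec_decide_maximal_clique graph set_nodes out) := by unfold Spec_decide_maximal_clique; infer_instance

-- ===== CLAIM (what is proved, stated in full; the proofs are below) =====
def Claim_equal_decide_maximal_clique : Prop := ∀ (graph : List (List Int)) (set_nodes : List Int), Dom_decide_maximal_clique graph set_nodes → Pre_decide_maximal_clique graph set_nodes → Spec_decide_maximal_clique graph set_nodes (decide_maximal_clique graph set_nodes)

-- ===== LEMMAS AND PROOFS =====

theorem cliqueInner_eq (g : List (List Int)) (i : Int) (js : List Int) :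
    cliqueInner g i js
      = !(js.any fun j => decide (i ≠ j) && decide (pvAt g i j = 0)) := by
  induction js with
  | nil => rfl
  | cons j js ih =>
      by_cases h : i ≠ j ∧ pvAt g i j = 0
      · simp [cliqueInner, h, ih]
      · simp [cliqueInner, h, ih]
        tauto

theorem cliqueOuter_eq (g : List (List Int)) (sn is : List Int) :
    cliqueOuter g sn is = is.all (fun i => cliqueInner g i sn) := by
  induction is with
  | nil => rfl
  | cons i is ih =>
      cases h : cliqueInner g i sn <;> simp [cliqueOuter, h, ih]

theorem maxInner_eq (g : List (List Int)) (i : Int) (js : List Int) :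
    maxInner g i js = js.all (fun j => !decide (pvAt g i j = 0)) := by
  unfold maxInner
  suffices h : ∀ b0 : Bool,
      js.foldl (fun b j => if pvAt g i j = 0 then false else b) b0
        = (b0 && js.all (fun j => !decide (pvAt g i j = 0))) by
    simpa using h true
  induction js with
  | nil => simp
  | cons j js ih =>
      intro b0
      rw [List.foldl_cons, ih]
      by_cases h : pvAt g i j = 0 <;> simp [h]

theorem foldl_filter_eq {α : Type} (p : Int → α → Bool) (js : List Int) :
    ∀ c0 : List α,
      js.foldl (fun c j => c.filter (p j)) c0
        = c0.filter (fun x => js.all (fun j => p j x)) := by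
  induction js with
  | nil => intro c0; simp
  | cons j js ih =>
      intro c0
      simp [List.foldl_cons, ih, List.filter_filter, Bool.and_comm]

theorem isEmpty_filter {α : Type} (p : α → Bool) (l : List α) :
    (l.filter p).isEmpty = !(l.any p) := by
  induction l with
  | nil => rfl
  | cons x l ih => cases h : p x <;> simp [h, ih]

theorem maxOuter_eq (g : List (List Int)) (sn is : List Int) :
    maxOuter g sn is
      = !(is.any fun i => !decide (i ∈ sn) && maxInner g i sn) := by
  induction is with
  | nil => rfl
  | cons i is ih =>
      by_cases hm : i ∈ sn
      · simp [maxOuter, hm, ih]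
      · cases h : maxInner g i sn <;> simp [maxOuter, hm, h, ih]

-- ===== VERDICT (by name: the statement is the Claim_ definition above) =====
theorem decide_maximal_clique_spec : Claim_equal_decide_maximal_clique := by
  intro graph set_nodes _ _
  unfold Spec_decide_maximal_clique
  unfold decide_maximal_clique decide_maximal_clique_alt decide_clique
  have hc : cliqueOuter graph set_nodes set_nodes
      = !(set_nodes.any fun i => set_nodes.any fun j =>
            decide (i ≠ j) && decide (pvAt graph i j = 0)) := by
    rw [cliqueOuter_eq]
    simp only [cliqueInner_eq, List.all_eq_not_any_not, Bool.not_not]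
  rw [hc]
  cases h : set_nodes.any (fun i => set_nodes.any fun j =>
      decide (i ≠ j) && decide (pvAt graph i j = 0)) with
  | true => rfl
  | false =>
      simp only [Bool.not_false, if_neg (by simp : ¬(true = false)),
        Bool.false_eq_true, if_neg (fun hx => hx : ¬False)]
      rw [maxOuter_eq, foldl_filter_eq, List.filter_filter, isEmpty_filter]
      simp [maxInner_eq]
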